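-- pv_equiv track=rewrite | github.com/batuhanovski/minimax_and_abpruning | minimax_abpruning_batuhan.py | utilityFinder
-- ===== SOURCE A (Python) =====
-- def utilityFinder(board):
--     q1,q2,r1,r2,b1,b2= 0,0,0,0,0,0
--
--     for row in board:
--             q1+=row.count("Q1")
--             q2+=row.count("Q2")
--             r1+=row.count("R1")
--             r2+=row.count("R2")
--             b1+=row.count("B1")
--             b2+=row.count("B2")
--
--     return 9*(q1-q2) + 5*(r1-r2) + 3*(b1-b2)
-- ===== SOURCE B (Python) =====
-- WEIGHTS = {"Q1": 9, "Q2": -9, "R1": 5, "R2": -5, "B1": 3, "B2": -3}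
--
-- def utilityFinder(board):
--     total = 0
--     for row in board:
--         for cell in row:
--             total += WEIGHTS.get(cell, 0)
--     return total
-- ===== Notes on version B (the rewrite author's own statement) =====
-- stated objective: simpler
-- what changed: Replaces six separate .count scans per row plus a final weighted formula by a single cell-by-cell pass accumulating weights.get(cell, 0) from a weight table defined once.
import Mathlib
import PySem

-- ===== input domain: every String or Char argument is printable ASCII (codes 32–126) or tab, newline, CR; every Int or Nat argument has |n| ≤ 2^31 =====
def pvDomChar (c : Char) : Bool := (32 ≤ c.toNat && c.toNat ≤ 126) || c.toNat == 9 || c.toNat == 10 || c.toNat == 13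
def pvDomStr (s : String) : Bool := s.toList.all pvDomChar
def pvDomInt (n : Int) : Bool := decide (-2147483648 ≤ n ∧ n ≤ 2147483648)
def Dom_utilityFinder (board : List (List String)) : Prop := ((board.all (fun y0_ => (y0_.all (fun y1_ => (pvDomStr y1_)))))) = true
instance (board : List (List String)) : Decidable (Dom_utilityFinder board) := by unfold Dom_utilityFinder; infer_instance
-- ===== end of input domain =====

-- B replaces A's six per-row .count scans by one table-driven pass over the cells (objective: simpler).

-- ===== PORT A =====
-- six counters accumulated row by row, then the weighted formula
def utilityFinder (board : List (List String)) : Int :=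
  let s := board.foldl
    (fun (t : Int × Int × Int × Int × Int × Int) row =>
      (t.1 + (PySem.List.count row "Q1" : Int),
       t.2.1 + (PySem.List.count row "Q2" : Int),
       t.2.2.1 + (PySem.List.count row "R1" : Int),
       t.2.2.2.1 + (PySem.List.count row "R2" : Int),
       t.2.2.2.2.1 + (PySem.List.count row "B1" : Int),
       t.2.2.2.2.2 + (PySem.List.count row "B2" : Int)))
    (0, 0, 0, 0, 0, 0)
  9 * (s.1 - s.2.1) + 5 * (s.2.2.1 - s.2.2.2.1) + 3 * (s.2.2.2.2.1 - s.2.2.2.2.2)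

-- ===== PORT B =====
def pvWeights : PySem.Dict String Int :=
  PySem.Dict.ofList [("Q1", 9), ("Q2", -9), ("R1", 5), ("R2", -5), ("B1", 3), ("B2", -3)]

def utilityFinder_alt (board : List (List String)) : Int :=
  board.foldl (fun total row =>
    row.foldl (fun total cell => total + pvWeights.getD cell 0) total) 0

-- ===== PRECONDITION & SPEC =====
def Spec_utilityFinder (board : List (List String)) (out : Int) : Prop := out = utilityFinder_alt board
instance (board : List (List String)) (out : Int) : Decidable (Spec_utilityFinder board out) := by unfold Spec_utilityFinder; infer_instance

-- ===== CLAIM =====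
def Claim_equal_utilityFinder : Prop := ∀ (board : List (List String)), Dom_utilityFinder board → Spec_utilityFinder board (utilityFinder board)

-- ===== LEMMAS AND PROOFS =====

-- the weight table as a case split
theorem pv_getD (c : String) :
    pvWeights.getD c 0 =
      if c = "Q1" then 9 else if c = "Q2" then -9 else if c = "R1" then 5
      else if c = "R2" then -5 else if c = "B1" then 3 else if c = "B2" then -3 else 0 := by
  have hw : pvWeights =
      PySem.Dict.mk [("Q1", 9), ("Q2", -9), ("R1", 5), ("R2", -5), ("B1", 3), ("B2", -3)] := by
    decide
  rw [hw]
  simp only [PySem.Dict.getD, PySem.Dict.get?_mk_cons, beq_iff_eq, eq_comm (a := c)]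
  split_ifs <;> simp [PySem.Dict.get?]

-- one row of B's inner fold equals the weighted counts of that row
theorem pv_row (row : List String) (t : Int) :
    row.foldl (fun total cell => total + pvWeights.getD cell 0) t =
      t + 9 * (row.count "Q1" : Int) - 9 * (row.count "Q2" : Int)
        + 5 * (row.count "R1" : Int) - 5 * (row.count "R2" : Int)
        + 3 * (row.count "B1" : Int) - 3 * (row.count "B2" : Int) := by
  induction row generalizing t with
  | nil => simp
  | cons c cs ih =>
    rw [List.foldl_cons, ih]
    simp only [List.count_cons, beq_iff_eq, pv_getD]
    split_ifs <;> first
      | (push_cast; omega)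
      | (exfalso; clear ih; simp_all)

theorem pv_main (board : List (List String)) (q1 q2 r1 r2 b1 b2 t : Int)
    (h : t = 9 * (q1 - q2) + 5 * (r1 - r2) + 3 * (b1 - b2)) :
    (let s := board.foldl
      (fun (t : Int × Int × Int × Int × Int × Int) row =>
        (t.1 + (PySem.List.count row "Q1" : Int),
         t.2.1 + (PySem.List.count row "Q2" : Int),
         t.2.2.1 + (PySem.List.count row "R1" : Int),
         t.2.2.2.1 + (PySem.List.count row "R2" : Int),
         t.2.2.2.2.1 + (PySem.List.count row "B1" : Int),
         t.2.2.2.2.2 + (PySem.List.count row "B2" : Int)))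
      (q1, q2, r1, r2, b1, b2)
     9 * (s.1 - s.2.1) + 5 * (s.2.2.1 - s.2.2.2.1) + 3 * (s.2.2.2.2.1 - s.2.2.2.2.2)) =
    board.foldl (fun total row =>
      row.foldl (fun total cell => total + pvWeights.getD cell 0) total) t := by
  induction board generalizing q1 q2 r1 r2 b1 b2 t with
  | nil => simp [h]
  | cons row rest ih =>
    simp only [List.foldl_cons]
    refine ih _ _ _ _ _ _ _ ?_
    rw [pv_row]
    simp only [PySem.List.count, h]
    ring

-- ===== VERDICT =====
theorem utilityFinder_spec : Claim_equal_utilityFinder := by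
  intro board _
  unfold Spec_utilityFinder utilityFinder utilityFinder_alt
  exact pv_main board 0 0 0 0 0 0 0 (by ring)
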